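-- pv_equiv track=rewrite | github.com/Akesafe/TTFM_A-Triggered-Task-Flow-Model | Experiment_test/search_test.py | generate_allocation_matrix
-- ===== SOURCE A (Python) =====
-- import itertools
--
-- def generate_allocation_matrix(num_nodes, num_tasks):
--     """生成所有可能的分配矩阵"""
--     # 每个任务分配到某个节点，0 表示未分配，1 表示分配
--     all_matrices = []
--     node_task_combinations = itertools.product(range(num_nodes), repeat=num_tasks)
--     for combo in node_task_combinations:
--         matrix = [[0] * num_tasks for _ in range(num_nodes)]
--         for task_id, node_id in enumerate(combo):
--             matrix[node_id][task_id] = 1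
--         all_matrices.append(matrix)
--     return all_matrices
-- ===== SOURCE B (Python) =====
-- def generate_allocation_matrix(num_nodes, num_tasks):
--     """生成所有可能的分配矩阵"""
--     # Incrementally expand the set of partial matrices one task at a time,
--     # instead of materialising finished combos with itertools.product.
--     work = [[[0] * num_tasks for _ in range(num_nodes)]]
--     for task_id in range(num_tasks):
--         new_work = []
--         for m in work:
--             for node_id in range(num_nodes):
--                 c = [row[:] for row in m]
--                 c[node_id][task_id] = 1
--                 new_work.append(c)
--         work = new_work
--     return work
-- ===== Notes on version B (the rewrite author's own statement) =====
-- stated objective: alternative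
-- what changed: Replaces the itertools.product enumeration of finished combos (each followed by building a fresh zero matrix and setting one cell per task) with an incremental expansion: start from one all-zeros matrix and, per task, replace the working list by every copy with that task's column set for each node.
import Mathlib
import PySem

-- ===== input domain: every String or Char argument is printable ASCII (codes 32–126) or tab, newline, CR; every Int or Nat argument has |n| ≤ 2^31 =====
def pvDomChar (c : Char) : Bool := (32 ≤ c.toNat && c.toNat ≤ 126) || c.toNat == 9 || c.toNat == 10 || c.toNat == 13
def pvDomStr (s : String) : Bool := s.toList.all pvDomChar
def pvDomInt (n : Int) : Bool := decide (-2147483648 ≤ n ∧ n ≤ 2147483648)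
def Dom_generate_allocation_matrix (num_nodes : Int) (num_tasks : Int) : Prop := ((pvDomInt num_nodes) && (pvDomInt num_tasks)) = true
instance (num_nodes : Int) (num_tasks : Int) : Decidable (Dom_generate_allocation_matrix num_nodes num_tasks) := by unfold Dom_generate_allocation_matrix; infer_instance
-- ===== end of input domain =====

-- B replaces the itertools.product enumeration of finished combos with an incremental
-- per-task expansion of a working list of partial matrices (objective: alternative).
-- ===== PORT A =====

-- [[0] * num_tasks for _ in range(num_nodes)]
def pvZeroMatrix (num_nodes : Int) (num_tasks : Int) : List (List Int) :=
  (PySem.List.pyRange 0 num_nodes 1).map (fun _ => List.replicate num_tasks.toNat 0)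

-- matrix[node_id][task_id] = 1 (indices always in range on the admitted inputs; exact there)
def pvAssign (m : List (List Int)) (node_id : Int) (task_id : Int) : List (List Int) :=
  PySem.List.pySetD m node_id (PySem.List.pySetD (PySem.List.pyGetD m node_id []) task_id 1)

-- itertools.product(range(num_nodes), repeat=num_tasks), in product's order
def pvProdRep (R : List Int) : Nat → List (List Int)
  | 0 => [[]]
  | k + 1 => R.flatMap (fun x => (pvProdRep R k).map (fun c => x :: c))

-- one iteration of A's loop body: fresh zero matrix, then matrix[node_id][task_id] = 1 per enumerate(combo)
def pvMkMatrix (num_nodes : Int) (num_tasks : Int) (combo : List Int) : List (List Int) :=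
  (PySem.List.enumerate combo 0).foldl (fun m p => pvAssign m p.2 p.1)
    (pvZeroMatrix num_nodes num_tasks)

def generate_allocation_matrix (num_nodes : Int) (num_tasks : Int) : List (List (List Int)) :=
  (pvProdRep (PySem.List.pyRange 0 num_nodes 1) num_tasks.toNat).foldl
    (fun all_matrices combo => all_matrices ++ [pvMkMatrix num_nodes num_tasks combo]) []

-- ===== PORT B =====

-- one pass of B's outer loop: for m in work: for node_id in range(num_nodes): copy, set, append
def pvExpand (num_nodes : Int) (task_id : Int) (work : List (List (List Int))) : List (List (List Int)) :=
  work.foldl (fun new_work m =>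
    (PySem.List.pyRange 0 num_nodes 1).foldl
      (fun new_work node_id => new_work ++ [pvAssign m node_id task_id]) new_work) []

def generate_allocation_matrix_alt (num_nodes : Int) (num_tasks : Int) : List (List (List Int)) :=
  (PySem.List.pyRange 0 num_tasks 1).foldl
    (fun work task_id => pvExpand num_nodes task_id work)
    [pvZeroMatrix num_nodes num_tasks]

-- ===== PRECONDITION & SPEC =====
-- A raises ValueError when num_tasks < 0 (itertools.product's repeat argument); excluded here.
def Pre_generate_allocation_matrix (num_nodes : Int) (num_tasks : Int) : Prop := 0 ≤ num_tasks
instance (num_nodes : Int) (num_tasks : Int) : Decidable (Pre_generate_allocation_matrix num_nodes num_tasks) := by unfold Pre_generate_allocation_matrix; infer_instance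

def pvWitness_generate_allocation_matrix : Int × Int := (2, 2)

def Spec_generate_allocation_matrix (num_nodes : Int) (num_tasks : Int) (out : List (List (List Int))) : Prop := out = generate_allocation_matrix_alt num_nodes num_tasks
instance (num_nodes : Int) (num_tasks : Int) (out : List (List (List Int))) : Decidable (Spec_generate_allocation_matrix num_nodes num_tasks out) := by unfold Spec_generate_allocation_matrix; infer_instance

-- ===== CLAIM (what is proved, stated in full; the proofs are below) =====
def Claim_equal_generate_allocation_matrix : Prop := ∀ (num_nodes : Int) (num_tasks : Int), Dom_generate_allocation_matrix num_nodes num_tasks → Pre_generate_allocation_matrix num_nodes num_tasks → Spec_generate_allocation_matrix num_nodes num_tasks (generate_allocation_matrix num_nodes num_tasks)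


-- ===== LEMMAS AND PROOFS =====

-- every combo produced by pvProdRep R k has length k
theorem pvProdRep_length (R : List Int) (k : Nat) :
    ∀ c ∈ pvProdRep R k, c.length = k := by
  induction k with
  | zero => intro c hc; simp [pvProdRep] at hc; simp [hc]
  | succ k ih =>
    intro c hc
    simp only [pvProdRep, List.mem_flatMap, List.mem_map] at hc
    obtain ⟨x, _, c', hc', rfl⟩ := hc
    simp [ih c' hc']

-- snoc formulation of the product (append the new coordinate at the right)
theorem pvProdRep_snoc (R : List Int) (k : Nat) :
    pvProdRep R (k + 1) = (pvProdRep R k).flatMap (fun c => R.map (fun x => c ++ [x])) := by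
  induction k with
  | zero =>
    show R.flatMap (fun x => [[]].map (fun c => x :: c))
        = [[]].flatMap (fun c => R.map (fun x => c ++ [x]))
    induction R with
    | nil => simp
    | cons a l ihR => simpa using ihR
  | succ k ih =>
    show R.flatMap (fun x => (pvProdRep R (k + 1)).map (fun c => x :: c))
        = (R.flatMap (fun x => (pvProdRep R k).map (fun c => x :: c))).flatMap
            (fun c => R.map (fun x => c ++ [x]))
    rw [ih]
    simp [List.map_flatMap, List.flatMap_map, List.flatMap_assoc, List.map_map, Function.comp_def]

-- setting the next column of a partial matrix = building the matrix of the extended combo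
theorem pvMkMatrix_snoc (num_nodes num_tasks : Int) (c : List Int) (x : Int) :
    pvMkMatrix num_nodes num_tasks (c ++ [x])
      = pvAssign (pvMkMatrix num_nodes num_tasks c) x (c.length : Int) := by
  simp [pvMkMatrix, PySem.List.enumerate_append, List.foldl_append, PySem.List.enumerate]

-- pvExpand as a flatMap over the working list
theorem pvExpand_eq_flatMap (num_nodes task_id : Int) (work : List (List (List Int))) :
    pvExpand num_nodes task_id work
      = work.flatMap (fun m => (PySem.List.pyRange 0 num_nodes 1).map
          (fun node_id => pvAssign m node_id task_id)) := by
  have inner : ∀ (m : List (List Int)) (acc : List (List (List Int))),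
      (PySem.List.pyRange 0 num_nodes 1).foldl
        (fun new_work node_id => new_work ++ [pvAssign m node_id task_id]) acc
      = acc ++ (PySem.List.pyRange 0 num_nodes 1).map (fun node_id => pvAssign m node_id task_id) :=
    fun m acc => PySem.List.foldl_append_singleton_eq_map _ _ _
  unfold pvExpand
  generalize PySem.List.pyRange 0 num_nodes 1 = R at inner ⊢
  suffices h : ∀ acc, work.foldl (fun new_work m =>
      R.foldl (fun nw node_id => nw ++ [pvAssign m node_id task_id]) new_work) acc
      = acc ++ work.flatMap (fun m => R.map (fun node_id => pvAssign m node_id task_id)) by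
    simpa using h []
  induction work with
  | nil => intro acc; simp
  | cons m ms ih => intro acc; simp [List.foldl_cons, inner, ih, List.append_assoc, List.flatMap]

-- loop invariant: after j expansion passes the working list is the matrices of all length-j combos
theorem pvInvariant (num_nodes num_tasks : Int) (j : Nat) :
    (List.range j).foldl (fun work (k : Nat) => pvExpand num_nodes ((k : Int)) work)
        [pvZeroMatrix num_nodes num_tasks]
      = (pvProdRep (PySem.List.pyRange 0 num_nodes 1) j).map (pvMkMatrix num_nodes num_tasks) := by
  induction j with
  | zero => simp [pvProdRep, pvMkMatrix, PySem.List.enumerate]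
  | succ j ih =>
    rw [List.range_succ, List.foldl_append, List.foldl_cons, List.foldl_nil, ih,
        pvExpand_eq_flatMap, pvProdRep_snoc, List.flatMap_map, List.map_flatMap]
    apply List.flatMap_congr
    intro c hc
    rw [List.map_map]
    apply List.map_congr_left
    intro x _
    simp only [Function.comp_apply]
    rw [pvMkMatrix_snoc, pvProdRep_length _ _ c hc]

-- A's collect-into-a-list loop is a map over the product
theorem pvA_eq_map (num_nodes num_tasks : Int) :
    generate_allocation_matrix num_nodes num_tasks
      = (pvProdRep (PySem.List.pyRange 0 num_nodes 1) num_tasks.toNat).map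
          (pvMkMatrix num_nodes num_tasks) := by
  unfold generate_allocation_matrix
  rw [PySem.List.foldl_append_singleton_eq_map]
  simp

-- ===== VERDICT (by name: the statement is the Claim_ definition above) =====
theorem generate_allocation_matrix_spec : Claim_equal_generate_allocation_matrix := by
  intro num_nodes num_tasks _ hpre
  unfold Spec_generate_allocation_matrix generate_allocation_matrix_alt
  rw [PySem.List.pyRange_one 0 num_tasks, List.foldl_map, pvA_eq_map]
  have ht : Int.toNat (num_tasks - 0) = num_tasks.toNat := by omega
  rw [ht]
  have h := pvInvariant num_nodes num_tasks num_tasks.toNat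
  simp only [zero_add] at h ⊢
  exact h.symm
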